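-- pv_equiv track=rewrite | github.com/lancelot291/algorithms-level-4 | 2025-01-24/87_cut-list.py | solution
-- ===== SOURCE A (Python) =====
-- def solution(n, left, right):
--     arr = [[n]*n for i in range(n)]
--     for i in range(0, n):
--         arr[i][i] = i+1
--         for j in range(0, i):
--             arr[i][j] = i+1
--             arr[j][i] = i+1
--
--
--     onedim_list = []
--     for i in range(n):
--         onedim_list += arr[i]
--
--     return onedim_list[left:right+1]
-- ===== SOURCE B (Python) =====
-- def solution(n, left, right):
--     # Direct O(right-left) formula: flattened entry k is max(k//n, k%n) + 1.
--     if n <= 0: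
--         return []
--     size = n * n
--     start = left + size if left < 0 else left
--     start = min(max(start, 0), size)
--     stop = right + 1
--     stop = stop + size if stop < 0 else stop
--     stop = min(max(stop, 0), size)
--     return [max(k // n, k % n) + 1 for k in range(start, stop)]
-- ===== Notes on version B (the rewrite author's own statement) =====
-- stated objective: faster
-- what changed: B replaces A's O(n^2) construction of the full max(i,j)+1 matrix and its flattening by computing each requested entry directly via the closed form max(k//n, k%n)+1 over the normalized slice range only.
import Mathlib
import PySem

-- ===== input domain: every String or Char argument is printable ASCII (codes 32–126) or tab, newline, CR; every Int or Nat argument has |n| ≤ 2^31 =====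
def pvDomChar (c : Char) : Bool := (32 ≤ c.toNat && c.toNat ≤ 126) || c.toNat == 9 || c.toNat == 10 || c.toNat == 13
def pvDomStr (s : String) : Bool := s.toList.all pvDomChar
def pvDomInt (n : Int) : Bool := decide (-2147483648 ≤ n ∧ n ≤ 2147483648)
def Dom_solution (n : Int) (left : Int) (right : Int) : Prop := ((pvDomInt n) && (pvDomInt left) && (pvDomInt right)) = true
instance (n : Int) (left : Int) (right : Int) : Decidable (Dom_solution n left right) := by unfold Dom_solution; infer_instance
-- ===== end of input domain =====

-- B replaces A's O(n^2) matrix construction by the closed form max(k//n, k%n)+1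
-- computed only for the O(right-left) indices of the requested slice (objective: faster).

-- ===== PORT A =====
def solution (n : Int) (left : Int) (right : Int) : List Int :=
  let arr := (PySem.List.pyRange 0 n 1).map (fun _ => List.replicate n.toNat n)
  let arr2 := (PySem.List.pyRange 0 n 1).foldl (fun arr i =>
      let arr := PySem.List.pySetD arr i (PySem.List.pySetD (PySem.List.pyGetD arr i []) i (i+1))
      (PySem.List.pyRange 0 i 1).foldl (fun arr j =>
        let arr := PySem.List.pySetD arr i (PySem.List.pySetD (PySem.List.pyGetD arr i []) j (i+1))
        PySem.List.pySetD arr j (PySem.List.pySetD (PySem.List.pyGetD arr j []) i (i+1))) arr) arr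
  let onedim := (PySem.List.pyRange 0 n 1).foldl (fun od i => od ++ PySem.List.pyGetD arr2 i []) []
  PySem.List.slice onedim (some left) (some (right+1))

-- ===== PORT B =====
def solution_alt (n : Int) (left : Int) (right : Int) : List Int :=
  if n ≤ 0 then [] else
  let size := n * n
  let start0 := if left < 0 then left + size else left
  let start := min (max start0 0) size
  let stop0 := right + 1
  let stop1 := if stop0 < 0 then stop0 + size else stop0
  let stop := min (max stop1 0) size
  (PySem.List.pyRange start stop 1).map
    (fun k => max (PySem.Int.floordiv k n) (PySem.Int.mod k n) + 1)

-- ===== PRECONDITION & SPEC =====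
def Spec_solution (n : Int) (left : Int) (right : Int) (out : List Int) : Prop := out = solution_alt n left right
instance (n : Int) (left : Int) (right : Int) (out : List Int) : Decidable (Spec_solution n left right out) := by unfold Spec_solution; infer_instance

-- ===== CLAIM (what is proved, stated in full; the proofs are below) =====
def Claim_equal_solution : Prop := ∀ (n : Int) (left : Int) (right : Int), Dom_solution n left right → Spec_solution n left right (solution n left right)

-- ===== LEMMAS AND PROOFS =====

/-- n×n matrix given by an entry function. -/
def matOf (N : Nat) (f : Nat → Nat → Int) : List (List Int) :=
  (List.range N).map (fun p => (List.range N).map (f p))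

theorem map_range_set {β : Type} (N j : Nat) (g : Nat → β) (v : β) (_hj : j < N) :
    ((List.range N).map g).set j v = (List.range N).map (fun q => if q = j then v else g q) := by
  apply List.ext_getElem
  · simp
  · intro i h1 h2
    simp only [List.getElem_set, List.getElem_map, List.getElem_range]
    simp only [List.length_set, List.length_map, List.length_range] at h1
    rcases eq_or_ne j i with h | h
    · simp [h]
    · simp [h, Ne.symm h]

theorem matOf_congr {N : Nat} {f g : Nat → Nat → Int}
    (h : ∀ p, p < N → ∀ q, q < N → f p q = g p q) : matOf N f = matOf N g := by
  unfold matOf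
  apply List.map_congr_left
  intro p hp
  apply List.map_congr_left
  intro q hq
  exact h p (List.mem_range.mp hp) q (List.mem_range.mp hq)

theorem setEntry (N i j : Nat) (f : Nat → Nat → Int) (v : Int) (hi : i < N) (hj : j < N) :
    PySem.List.pySetD (matOf N f) (i:Int)
      (PySem.List.pySetD (PySem.List.pyGetD (matOf N f) (i:Int) []) (j:Int) v)
    = matOf N (fun p q => if p = i ∧ q = j then v else f p q) := by
  simp only [PySem.List.pySetD_natCast, PySem.List.pyGetD_natCast]
  unfold matOf
  rw [PySem.List.getD_map_range _ _ _ _ hi, map_range_set N j (f i) v hj,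
      map_range_set N i _ _ hi]
  apply List.map_congr_left
  intro p hp
  by_cases hpi : p = i
  · subst hpi
    rw [if_pos rfl]
    apply List.map_congr_left
    intro q _
    by_cases hq : q = j <;> simp [hq]
  · simp only [if_neg hpi]
    apply List.map_congr_left
    intro q _
    simp [hpi]

/-- Inner loop of A: after `t` steps of `for j in range(i)` (preceded by the diagonal write,
already folded into `f`), entries (i,j) and (j,i) for j < t hold i+1. -/
theorem inner_loop (N i : Nat) (f : Nat → Nat → Int) (t : Nat) (hi : i < N) (ht : t ≤ i) :
    (List.range t).foldl (fun (arr : List (List Int)) (j : Nat) =>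
        PySem.List.pySetD
          (PySem.List.pySetD arr (i:Int)
            (PySem.List.pySetD (PySem.List.pyGetD arr (i:Int) []) (j:Int) ((i:Int)+1)))
          (j:Int)
          (PySem.List.pySetD
            (PySem.List.pyGetD
              (PySem.List.pySetD arr (i:Int)
                (PySem.List.pySetD (PySem.List.pyGetD arr (i:Int) []) (j:Int) ((i:Int)+1)))
              (j:Int) []) (i:Int) ((i:Int)+1)))
      (matOf N f)
    = matOf N (fun p q => if (p = i ∧ q < t) ∨ (q = i ∧ p < t) then (i:Int)+1 else f p q) := by
  induction t with
  | zero =>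
    symm; apply matOf_congr; intro p _ q _; simp
  | succ t ih =>
    have ht' : t ≤ i := Nat.le_of_succ_le ht
    have htN : t < N := lt_of_lt_of_le (Nat.lt_of_lt_of_le (Nat.lt_succ_self t) ht) (Nat.le_of_lt hi)
    rw [List.range_succ, List.foldl_append, ih ht', List.foldl_cons, List.foldl_nil,
        setEntry N i t _ _ hi htN, setEntry N t i _ _ htN hi]
    apply matOf_congr
    intro p hp q hq
    split_ifs <;> first | rfl | omega

/-- Outer loop of A: after `m` iterations every entry (p,q) with max p q < m holds max p q + 1. -/
theorem outer_loop (N : Nat) (m : Nat) (hm : m ≤ N) :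
    (List.range m).foldl (fun (arr : List (List Int)) (i : Nat) =>
        (PySem.List.pyRange 0 (i:Int) 1).foldl (fun arr j =>
          PySem.List.pySetD
            (PySem.List.pySetD arr (i:Int)
              (PySem.List.pySetD (PySem.List.pyGetD arr (i:Int) []) j ((i:Int)+1)))
            j
            (PySem.List.pySetD
              (PySem.List.pyGetD
                (PySem.List.pySetD arr (i:Int)
                  (PySem.List.pySetD (PySem.List.pyGetD arr (i:Int) []) j ((i:Int)+1)))
                j []) (i:Int) ((i:Int)+1)))
          (PySem.List.pySetD arr (i:Int)
            (PySem.List.pySetD (PySem.List.pyGetD arr (i:Int) []) (i:Int) ((i:Int)+1))))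
      (matOf N (fun _ _ => (N:Int)))
    = matOf N (fun p q => if max p q < m then ((max p q : Nat):Int)+1 else (N:Int)) := by
  induction m with
  | zero =>
    symm; apply matOf_congr; intro p _ q _; simp
  | succ m ih =>
    have hm' : m ≤ N := Nat.le_of_succ_le hm
    have hmN : m < N := hm
    rw [List.range_succ, List.foldl_append, ih hm', List.foldl_cons, List.foldl_nil,
        setEntry N m m _ _ hmN hmN, PySem.List.pyRange_zero_natCast, List.foldl_map,
        inner_loop N m _ m hmN le_rfl]
    apply matOf_congr
    intro p hp q hq
    split_ifs <;> first | rfl | omega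

/-- Flatten-by-concatenation loop of A. -/
theorem fold_append_getD (arr : List (List Int)) (acc : List Int) (m : Nat) :
    (List.range m).foldl (fun od i => od ++ arr.getD i []) acc
    = acc ++ ((List.range m).map (fun i => arr.getD i [])).flatten := by
  induction m generalizing acc with
  | zero => simp
  | succ m ih =>
    rw [List.range_succ, List.foldl_append, List.foldl_cons, List.foldl_nil, ih,
        List.map_append, List.flatten_append]
    simp [List.append_assoc]

theorem flatten_map_range (g : Nat → Nat → Int) (a b : Nat) (hb : 0 < b) :
    ((List.range a).map (fun p => (List.range b).map (g p))).flatten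
    = (List.range (a*b)).map (fun k => g (k/b) (k%b)) := by
  induction a with
  | zero => simp
  | succ a ih =>
    rw [List.range_succ, List.map_append, List.flatten_append, ih,
        Nat.succ_mul, List.range_add, List.map_append]
    congr 1
    simp only [List.map_cons, List.map_nil, List.flatten_cons, List.flatten_nil,
      List.append_nil, List.map_map]
    apply List.map_congr_left
    intro q hq
    have hq' : q < b := List.mem_range.mp hq
    have h1 : (a*b + q) / b = a := by
      rw [Nat.add_comm, Nat.add_mul_div_right _ _ hb, Nat.div_eq_of_lt hq']; omega
    have h2 : (a*b + q) % b = q := by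
      rw [Nat.add_comm, Nat.add_mul_mod_self_right]; exact Nat.mod_eq_of_lt hq'
    simp [Function.comp, h1, h2]

theorem clamp_eq (L : Nat) (x : Int) :
    min (max (if x < 0 then x + (L:Int) else x) 0) (L:Int) = ((PySem.List.clampIdx L x : Nat) : Int) := by
  simp only [PySem.List.clampIdx]
  split_ifs <;> omega

-- the two per-index formulas agree on nonnegative indices below n*n
theorem entry_formula (N s k : Nat) (_hN : 0 < N) :
    max (PySem.Int.floordiv ((s:Int) + (k:Int)) (N:Int)) (PySem.Int.mod ((s:Int) + (k:Int)) (N:Int)) + 1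
    = ((max ((s+k) / N) ((s+k) % N) : Nat) : Int) + 1 := by
  have h : (s:Int) + (k:Int) = ((s + k : Nat) : Int) := by push_cast; ring
  rw [h, PySem.Int.floordiv_natCast, PySem.Int.mod_natCast]
  congr 1
  exact (Nat.cast_max _ _).symm

theorem solution_eq_alt (n left right : Int) : solution n left right = solution_alt n left right := by
  by_cases hn : n ≤ 0
  · -- range(n) is empty, A slices the empty list; B returns []
    have h1 : PySem.List.pyRange 0 n 1 = [] := by
      rw [PySem.List.pyRange_one]
      have h0 : (n - 0).toNat = 0 := by omega
      rw [h0]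
      simp
    have hB : solution_alt n left right = [] := by unfold solution_alt; rw [if_pos hn]
    simp [solution, h1, PySem.List.slice, hB]
  · set N : Nat := n.toNat with hNdef
    have hNn : n = (N:Int) := by omega
    have hN : 0 < N := by omega
    -- A's final matrix
    have hmat : (PySem.List.pyRange 0 n 1).foldl (fun arr i =>
        let arr := PySem.List.pySetD arr i (PySem.List.pySetD (PySem.List.pyGetD arr i []) i (i+1))
        (PySem.List.pyRange 0 i 1).foldl (fun arr j =>
          let arr := PySem.List.pySetD arr i (PySem.List.pySetD (PySem.List.pyGetD arr i []) j (i+1))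
          PySem.List.pySetD arr j (PySem.List.pySetD (PySem.List.pyGetD arr j []) i (i+1))) arr)
        ((PySem.List.pyRange 0 n 1).map (fun _ => List.replicate n.toNat n))
        = matOf N (fun p q => if max p q < N then ((max p q : Nat):Int)+1 else (N:Int)) := by
      have hinit : (PySem.List.pyRange 0 n 1).map (fun _ => List.replicate n.toNat n)
          = matOf N (fun _ _ => (N:Int)) := by
        rw [hNn, PySem.List.pyRange_zero_natCast, List.map_map]
        unfold matOf
        apply List.map_congr_left
        intro p _
        simp
      rw [hinit, hNn, PySem.List.pyRange_zero_natCast, List.foldl_map]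
      exact outer_loop N N le_rfl
    simp only [solution, hmat]
    -- the flattened list
    have hflat : (PySem.List.pyRange 0 n 1).foldl (fun od i => od ++ PySem.List.pyGetD
          (matOf N (fun p q => if max p q < N then ((max p q : Nat):Int)+1 else (N:Int))) i []) []
        = (List.range (N*N)).map (fun k => ((max (k/N) (k%N) : Nat) : Int) + 1) := by
      rw [hNn, PySem.List.pyRange_zero_natCast, List.foldl_map]
      simp only [PySem.List.pyGetD_natCast]
      rw [fold_append_getD, List.nil_append]
      have hrows : (List.range N).map (fun i => (matOf N (fun p q =>
            if max p q < N then ((max p q : Nat):Int)+1 else (N:Int))).getD i [])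
          = (List.range N).map (fun p => (List.range N).map (fun q => ((max p q : Nat):Int)+1)) := by
        apply List.map_congr_left
        intro p hp
        have hp' : p < N := List.mem_range.mp hp
        unfold matOf
        rw [PySem.List.getD_map_range _ _ _ _ hp']
        apply List.map_congr_left
        intro q hq
        have hq' : q < N := List.mem_range.mp hq
        have : max p q < N := by omega
        simp [this]
      rw [hrows, flatten_map_range _ N N hN]
    rw [hflat]
    -- the slice
    set L : Nat := N * N with hL
    simp only [solution_alt, if_neg hn]
    have hsize : n * n = ((L:Nat):Int) := by rw [hNn, hL]; push_cast; ring
    rw [hsize, clamp_eq L left, clamp_eq L (right + 1)]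
    simp only [PySem.List.slice, List.length_map, List.length_range]
    set s : Nat := PySem.List.clampIdx L left with hs
    set t : Nat := PySem.List.clampIdx L (right + 1) with htdef
    have hsL : s ≤ L := PySem.List.clampIdx_le L left
    have htL : t ≤ L := PySem.List.clampIdx_le L (right + 1)
    rw [PySem.List.pyRange_one]
    have hcount : (((t:Nat):Int) - ((s:Nat):Int)).toNat = t - s := by omega
    rw [hcount, List.map_map]
    apply List.ext_getElem
    · simp only [List.length_take, List.length_drop, List.length_map, List.length_range]
      omega
    · intro k h1 h2
      simp only [List.length_take, List.length_drop, List.length_map, List.length_range] at h1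
      simp only [List.getElem_take, List.getElem_drop, List.getElem_map, List.getElem_range]
      rw [hNn]
      exact (entry_formula N s k hN).symm

-- ===== VERDICT (by name: the statement is the Claim_ definition above) =====
theorem solution_spec : Claim_equal_solution := by
  intro n left right _
  unfold Spec_solution
  exact solution_eq_alt n left right
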